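-- pv_equiv track=rewrite | github.com/HRishabh95/CREDPASS | read_portal.py | process_causes_il
-- ===== SOURCE A (Python) =====
-- def process_causes_il(rows):
--     if type(rows['causes_il']) is str:
--         symp_il=[]
--         sympsi=rows['causes_il'].split("..")
--         for symps in sympsi:
--             for symp in symps.split("."):
--                 if len(symp.split())<8 and len(symp)!=0:
--                     symp_il.append(f'''{rows['disease_name']} can be caused by {symp}''')
--         #symp_il=".".join(symp_il)
--         return symp_il
--     else:
--         return []
-- ===== SOURCE B (Python) =====
-- def process_causes_il(rows):
--     causes = rows['causes_il']
--     if type(causes) is not str: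
--         return []
--     out = []
--     frag = []
--
--     def flush():
--         s = ''.join(frag)
--         if s and len(s.split()) < 8:
--             out.append(f"{rows['disease_name']} can be caused by {s}")
--
--     for ch in causes:
--         if ch == '.':
--             flush()
--             frag.clear()
--         else:
--             frag.append(ch)
--     flush()
--     return out
-- ===== Notes on version B (the rewrite author's own statement) =====
-- stated objective: alternative
-- what changed: B replaces A's nested split-on-'..' then split-on-'.' double loop by a single character-level state machine: one pass over the string with a fragment accumulator that is flushed (filtered and templated) at every '.' and at the end, so no '.'-based split call is made at all.
import Mathlib
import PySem

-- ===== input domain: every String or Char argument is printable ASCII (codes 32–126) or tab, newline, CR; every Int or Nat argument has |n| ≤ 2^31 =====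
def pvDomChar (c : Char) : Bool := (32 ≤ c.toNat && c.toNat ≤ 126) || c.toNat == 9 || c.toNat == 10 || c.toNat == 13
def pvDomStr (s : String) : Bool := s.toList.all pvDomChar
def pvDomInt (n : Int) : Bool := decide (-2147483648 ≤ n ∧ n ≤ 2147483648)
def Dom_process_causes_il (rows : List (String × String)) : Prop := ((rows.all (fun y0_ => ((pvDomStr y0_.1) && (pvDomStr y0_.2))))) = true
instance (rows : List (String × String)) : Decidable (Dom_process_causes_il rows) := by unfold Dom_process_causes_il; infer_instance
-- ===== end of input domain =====

-- B replaces A's nested split-on-'..'-then-'.' loops by a one-pass character state machine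
-- (fragment accumulator flushed at each '.' and at the end); return value only, no mutation.

-- shared helper of both ports: the templated f-string (dict lookup = first match)
def pvSentence (rows : List (String × String)) (symp : List Char) : String :=
  String.ofList (((List.lookup "disease_name" rows).getD "").toList
    ++ (' ' :: 'c' :: 'a' :: 'n' :: ' ' :: 'b' :: 'e' :: ' ' :: 'c' :: 'a' :: 'u' :: 's' :: 'e' :: 'd' :: ' ' :: 'b' :: 'y' :: ' ' :: [])
    ++ symp)

-- ===== PORT A =====
-- A's filter: len(symp.split()) < 8 and len(symp) != 0
def pvCond (symp : List Char) : Bool :=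
  (PySem.Chars.split₀ symp).length < 8 && symp.length != 0

def process_causes_il (rows : List (String × String)) : List String :=
  match List.lookup "causes_il" rows with
  | none => []   -- Python raises KeyError here; excluded by Pre_
  | some cs =>
    (PySem.Chars.splitOn cs.toList ['.', '.']).foldl (fun symp_il symps =>
      (PySem.Chars.splitOn symps ['.']).foldl (fun acc symp =>
        if pvCond symp then acc ++ [pvSentence rows symp] else acc) symp_il) []

-- ===== PORT B =====
-- B's flush test: `if s and len(s.split()) < 8`
def pvCondB (frag : List Char) : Bool :=
  frag.length != 0 && (PySem.Chars.split₀ frag).length < 8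

def pvFlush (rows : List (String × String)) (out : List String) (frag : List Char) : List String :=
  if pvCondB frag then out ++ [pvSentence rows frag] else out

def process_causes_il_alt (rows : List (String × String)) : List String :=
  match List.lookup "causes_il" rows with
  | none => []   -- Python raises KeyError here; excluded by Pre_
  | some causes =>
    let st := causes.toList.foldl (fun (st : List String × List Char) ch =>
      if ch = '.' then (pvFlush rows st.1 st.2, ([] : List Char)) else (st.1, st.2 ++ [ch]))
      (([] : List String), ([] : List Char))
    pvFlush rows st.1 st.2

-- ===== PRECONDITION & SPEC =====
-- Pre_ is exactly the inputs on which the Python A returns: key 'causes_il' present, and key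
-- 'disease_name' present too unless no fragment passes the filter (then the f-string is never evaluated).
def Pre_process_causes_il (rows : List (String × String)) : Prop :=
  (List.lookup "causes_il" rows).isSome = true ∧
  ((List.lookup "disease_name" rows).isSome = true ∨
    ∀ f ∈ PySem.Chars.splitOn ((List.lookup "causes_il" rows).getD "").toList ['.'], pvCond f = false)
instance (rows : List (String × String)) : Decidable (Pre_process_causes_il rows) := by
  unfold Pre_process_causes_il; infer_instance

def pvWitness_process_causes_il : (List (String × String)) :=
  [("causes_il", "a.b"), ("disease_name", "flu")]

def Spec_process_causes_il (rows : List (String × String)) (out : List String) : Prop := out = process_causes_il_alt rows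
instance (rows : List (String × String)) (out : List String) : Decidable (Spec_process_causes_il rows out) := by unfold Spec_process_causes_il; infer_instance

-- ===== CLAIM (what is proved, stated in full; the proofs are below) =====
def Claim_equal_process_causes_il : Prop := ∀ (rows : List (String × String)), Dom_process_causes_il rows → Pre_process_causes_il rows → Spec_process_causes_il rows (process_causes_il rows)

-- ===== LEMMAS AND PROOFS =====

-- reference versions of split-on-"." (pvSp1) and split-on-".." (pvSp2)
def pvModc (c : Char) : List (List Char) → List (List Char)
  | [] => [[c]]
  | x :: xs => (c :: x) :: xs

def pvSp1 : List Char → List (List Char)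
  | [] => [[]]
  | c :: rest => if c = '.' then [] :: pvSp1 rest else pvModc c (pvSp1 rest)

def pvSp2 : List Char → List (List Char)
  | [] => [[]]
  | c :: rest =>
    if c = '.' ∧ rest.head? = some '.' then [] :: pvSp2 rest.tail
    else pvModc c (pvSp2 rest)
termination_by s => s.length
decreasing_by all_goals simp [List.length_tail]

theorem pvSp2_cons (c : Char) (rest : List Char) :
    pvSp2 (c :: rest) = if c = '.' ∧ rest.head? = some '.' then [] :: pvSp2 rest.tail else pvModc c (pvSp2 rest) := by
  rw [pvSp2]

def pvModp (p : List Char) : List (List Char) → List (List Char)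
  | [] => [p]
  | x :: xs => (p ++ x) :: xs

theorem pvSp1_ne_nil (s : List Char) : pvSp1 s ≠ [] := by
  cases s with
  | nil => simp [pvSp1]
  | cons c rest =>
    simp only [pvSp1]
    split
    · simp
    · cases h : pvSp1 rest <;> simp [pvModc]

theorem pvSp2_ne_nil (s : List Char) : pvSp2 s ≠ [] := by
  fun_induction pvSp2 s with
  | case1 => simp
  | case2 c rest h ih => simp
  | case3 c rest h ih => cases h2 : pvSp2 rest <;> simp [pvModc]

theorem pvGo_cons (sep : List Char) (fuel : Nat) (c : Char) (rest cur : List Char) (acc : List (List Char)) :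
    PySem.Chars.splitOn.go sep (fuel+1) (c::rest) cur acc =
      if sep.isPrefixOf (c::rest) then PySem.Chars.splitOn.go sep fuel (List.drop sep.length (c::rest)) [] (cur.reverse::acc)
      else PySem.Chars.splitOn.go sep fuel rest (c::cur) acc := rfl

theorem pvGo_nil (sep : List Char) (fuel : Nat) (cur : List Char) (acc : List (List Char)) :
    PySem.Chars.splitOn.go sep fuel [] cur acc = (cur.reverse :: acc).reverse := by
  cases fuel with
  | zero => rw [PySem.Chars.splitOn.go.eq_def]; simp
  | succ n => rfl

theorem pvGo1_eq (fuel : Nat) (l cur : List Char) (acc : List (List Char))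
    (h : l.length < fuel) :
    PySem.Chars.splitOn.go ['.'] fuel l cur acc = acc.reverse ++ pvModp cur.reverse (pvSp1 l) := by
  induction fuel generalizing l cur acc with
  | zero => omega
  | succ fuel ih =>
    cases l with
    | nil => rw [pvGo_nil]; simp [pvSp1, pvModp]
    | cons c rest =>
      rw [pvGo_cons]
      by_cases hc : c = '.'
      · subst hc
        rw [if_pos (by simp [List.isPrefixOf])]
        rw [show List.drop ['.'].length ('.' :: rest) = rest from rfl]
        rw [ih rest [] (cur.reverse :: acc) (by simp at h; omega)]
        have hne := pvSp1_ne_nil rest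
        cases h1 : pvSp1 rest with
        | nil => exact absurd h1 hne
        | cons x xs => simp [pvSp1, pvModp, h1]
      · rw [if_neg (by simp [List.isPrefixOf]; exact fun hh => hc hh.symm)]
        rw [ih rest (c :: cur) acc (by simp at h; omega)]
        have hne := pvSp1_ne_nil rest
        cases h1 : pvSp1 rest with
        | nil => exact absurd h1 hne
        | cons x xs => simp [pvSp1, pvModp, pvModc, h1, hc]

theorem pvSplitOn_dot (s : List Char) : PySem.Chars.splitOn s ['.'] = pvSp1 s := by
  unfold PySem.Chars.splitOn
  rw [pvGo1_eq (s.length + 1) s [] [] (Nat.lt_succ_self _)]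
  have hne := pvSp1_ne_nil s
  cases h1 : pvSp1 s with
  | nil => exact absurd h1 hne
  | cons x xs => simp [pvModp]

theorem pvGo2_eq (fuel : Nat) (l cur : List Char) (acc : List (List Char))
    (h : l.length < fuel) :
    PySem.Chars.splitOn.go ['.','.'] fuel l cur acc = acc.reverse ++ pvModp cur.reverse (pvSp2 l) := by
  induction fuel generalizing l cur acc with
  | zero => omega
  | succ fuel ih =>
    cases l with
    | nil => rw [pvGo_nil]; simp [pvSp2, pvModp]
    | cons c rest =>
      rw [pvGo_cons]
      by_cases hpre : List.isPrefixOf ['.','.'] (c :: rest) = true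
      · rw [if_pos hpre]
        obtain ⟨rest', hc, hrest⟩ : ∃ rest', c = '.' ∧ rest = '.' :: rest' := by
          cases rest with
          | nil => simp [List.isPrefixOf] at hpre
          | cons r2 rest' =>
            simp [List.isPrefixOf] at hpre
            exact ⟨rest', hpre.1.symm, by rw [← hpre.2]⟩
        subst hc; subst hrest
        rw [show List.drop ['.','.'].length ('.' :: '.' :: rest') = rest' from rfl]
        rw [ih rest' [] (cur.reverse :: acc) (by simp at h; omega)]
        have hne := pvSp2_ne_nil rest'
        cases h1 : pvSp2 rest' with
        | nil => exact absurd h1 hne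
        | cons x xs => rw [pvSp2_cons]; simp [pvModp, h1]
      · rw [if_neg hpre]
        rw [ih rest (c :: cur) acc (by simp at h; omega)]
        have hne := pvSp2_ne_nil rest
        have hcond : ¬ (c = '.' ∧ rest.head? = some '.') := by
          rintro ⟨hc, hh⟩
          subst hc
          cases rest with
          | nil => simp at hh
          | cons r2 rest' =>
            simp at hh
            subst hh
            simp [List.isPrefixOf] at hpre
        rw [pvSp2_cons, if_neg hcond]
        cases h1 : pvSp2 rest with
        | nil => exact absurd h1 hne
        | cons x xs => simp [pvModp, pvModc]

theorem pvSplitOn_dotdot (s : List Char) : PySem.Chars.splitOn s ['.','.'] = pvSp2 s := by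
  unfold PySem.Chars.splitOn
  rw [pvGo2_eq (s.length + 1) s [] [] (Nat.lt_succ_self _)]
  have hne := pvSp2_ne_nil s
  cases h1 : pvSp2 s with
  | nil => exact absurd h1 hne
  | cons x xs => simp [pvModp]

def pvNe (f : List Char) : Bool := !f.isEmpty

theorem pvFilter_tail (x : List Char) (Xt Yt : List (List Char))
    (h : (x :: Xt).filter pvNe = (x :: Yt).filter pvNe) : Xt.filter pvNe = Yt.filter pvNe := by
  by_cases hx : x = []
  · subst hx; simpa [pvNe] using h
  · have hxne : pvNe x = true := by simp [pvNe, hx]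
    simpa [List.filter_cons, hxne] using h

-- nested split-then-split equals the flat split, up to empty fragments (and their first fragments agree)
theorem pvFlat_main (s : List Char) :
    ((pvSp2 s).flatMap pvSp1).filter pvNe = (pvSp1 s).filter pvNe ∧
    ((pvSp2 s).flatMap pvSp1).head? = (pvSp1 s).head? := by
  fun_induction pvSp2 s with
  | case1 => simp [pvSp1]
  | case2 c rest h ih =>
    obtain ⟨hc, hh⟩ := h
    subst hc
    cases rest with
    | nil => simp at hh
    | cons r2 rest' =>
      simp only [List.head?] at hh
      injection hh with hr2
      subst hr2
      simp only [List.tail] at ih ⊢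
      constructor
      · simp only [List.flatMap_cons]
        rw [show pvSp1 [] = [[]] from rfl]
        simp only [List.singleton_append]
        rw [show pvSp1 ('.' :: '.' :: rest') = [] :: [] :: pvSp1 rest' by simp [pvSp1]]
        simp only [List.filter_cons]
        simp only [show pvNe [] = false from rfl]
        exact ih.1
      · simp [List.flatMap_cons, show pvSp1 [] = [[]] from rfl,
             show pvSp1 ('.' :: '.' :: rest') = [] :: [] :: pvSp1 rest' by simp [pvSp1]]
  | case3 c rest h ih =>
    have hne2 := pvSp2_ne_nil rest
    cases h2 : pvSp2 rest with
    | nil => exact absurd h2 hne2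
    | cons h2h t2 =>
      rw [h2] at ih
      by_cases hc : c = '.'
      · subst hc
        rw [show pvModc '.' (h2h :: t2) = ('.' :: h2h) :: t2 from rfl]
        rw [show pvSp1 ('.' :: rest) = [] :: pvSp1 rest by simp [pvSp1]]
        have hflat : List.flatMap pvSp1 (('.' :: h2h) :: t2) = [] :: List.flatMap pvSp1 (h2h :: t2) := by
          simp only [List.flatMap_cons]
          rw [show pvSp1 ('.' :: h2h) = [] :: pvSp1 h2h by simp [pvSp1]]
          simp
        rw [hflat]
        constructor
        · simp only [List.filter_cons, show pvNe [] = false from rfl]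
          exact ih.1
        · simp
      · have hy := pvSp1_ne_nil rest
        cases hy1 : pvSp1 rest with
        | nil => exact absurd hy1 hy
        | cons y yt =>
          rw [hy1] at ih
          have hhx := pvSp1_ne_nil h2h
          cases hx1 : pvSp1 h2h with
          | nil => exact absurd hx1 hhx
          | cons hx hxt =>
            have hX : List.flatMap pvSp1 (h2h :: t2) = hx :: (hxt ++ List.flatMap pvSp1 t2) := by
              simp [List.flatMap_cons, hx1]
            rw [hX] at ih
            have hxy : hx = y := by simpa using ih.2
            subst hxy
            rw [show pvModc c (h2h :: t2) = (c :: h2h) :: t2 from rfl]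
            rw [show pvSp1 (c :: rest) = pvModc c (pvSp1 rest) by simp [pvSp1, hc]]
            rw [hy1, show pvModc c (hx :: yt) = (c :: hx) :: yt from rfl]
            have hflat : List.flatMap pvSp1 ((c :: h2h) :: t2) = (c :: hx) :: (hxt ++ List.flatMap pvSp1 t2) := by
              simp only [List.flatMap_cons]
              rw [show pvSp1 (c :: h2h) = pvModc c (pvSp1 h2h) by simp [pvSp1, hc], hx1,
                 show pvModc c (hx :: hxt) = (c :: hx) :: hxt from rfl]
              simp
            rw [hflat]
            have hcne : pvNe (c :: hx) = true := by simp [pvNe]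
            constructor
            · simp only [List.filter_cons, hcne, if_pos]
              rw [pvFilter_tail hx _ _ ih.1]
            · simp

theorem pvFlat_filter (P : List Char → Bool) (hP : ∀ f, P f = true → f ≠ []) (s : List Char) :
    ((pvSp2 s).flatMap pvSp1).filter P = (pvSp1 s).filter P := by
  have h1 : ∀ l : List (List Char), l.filter P = (l.filter pvNe).filter P := by
    intro l
    rw [List.filter_filter]
    apply List.filter_congr
    intro a _
    cases hp : P a with
    | false => simp
    | true => simp [pvNe, hP a hp]
  rw [h1, h1 (pvSp1 s), (pvFlat_main s).1]

-- A computes the flat-split filter-map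
theorem pvA_eq (rows : List (String × String)) (cs : String)
    (h : List.lookup "causes_il" rows = some cs) :
    process_causes_il rows = ((pvSp1 cs.toList).filter pvCond).map (pvSentence rows) := by
  unfold process_causes_il
  rw [h]
  simp only []
  have hinner : (fun (symp_il : List String) (symps : List Char) =>
      (PySem.Chars.splitOn symps ['.']).foldl (fun acc symp =>
        if pvCond symp then acc ++ [pvSentence rows symp] else acc) symp_il)
      = fun symp_il symps => symp_il ++ ((PySem.Chars.splitOn symps ['.']).filter pvCond).map (pvSentence rows) := by
    funext symp_il symps
    exact PySem.List.foldl_append_if pvCond (pvSentence rows) _ symp_il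
  rw [hinner, PySem.List.foldl_append_eq_flatMap]
  rw [List.nil_append]
  simp only [pvSplitOn_dot, pvSplitOn_dotdot]
  rw [← List.map_flatMap, ← List.filter_flatMap]
  rw [pvFlat_filter pvCond (fun f hf => by simp [pvCond] at hf; exact fun h0 => by simp [h0] at hf) cs.toList]

-- B's scan loop computes the flat-split filter-map too
theorem pvScan (rows : List (String × String)) :
    ∀ (l frag : List Char) (out : List String),
    pvFlush rows
      (l.foldl (fun (st : List String × List Char) ch =>
        if ch = '.' then (pvFlush rows st.1 st.2, ([] : List Char)) else (st.1, st.2 ++ [ch])) (out, frag)).1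
      (l.foldl (fun (st : List String × List Char) ch =>
        if ch = '.' then (pvFlush rows st.1 st.2, ([] : List Char)) else (st.1, st.2 ++ [ch])) (out, frag)).2
    = out ++ ((pvModp frag (pvSp1 l)).filter pvCondB).map (pvSentence rows) := by
  intro l
  induction l with
  | nil =>
    intro frag out
    simp only [List.foldl_nil, pvSp1, pvModp, pvFlush]
    cases h : pvCondB frag <;> simp [h]
  | cons c rest ih =>
    intro frag out
    simp only [List.foldl_cons]
    by_cases hc : c = '.'
    · subst hc
      rw [if_pos rfl, ih [] (pvFlush rows out frag)]
      have hne := pvSp1_ne_nil rest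
      cases h1 : pvSp1 rest with
      | nil => exact absurd h1 hne
      | cons x xs =>
        rw [show pvSp1 ('.' :: rest) = [] :: pvSp1 rest by simp [pvSp1], h1]
        simp only [pvModp, List.nil_append, pvFlush]
        cases h : pvCondB frag <;> simp [h]
    · rw [if_neg hc, ih (frag ++ [c]) out]
      have hne := pvSp1_ne_nil rest
      cases h1 : pvSp1 rest with
      | nil => exact absurd h1 hne
      | cons x xs =>
        rw [show pvSp1 (c :: rest) = pvModc c (pvSp1 rest) by simp [pvSp1, hc], h1]
        simp [pvModp, pvModc]

theorem pvCondB_eq_pvCond : pvCondB = pvCond := by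
  funext f
  simp only [pvCondB, pvCond, Bool.and_comm]

theorem pv_ports_eq (rows : List (String × String)) :
    process_causes_il rows = process_causes_il_alt rows := by
  cases h : List.lookup "causes_il" rows with
  | none => unfold process_causes_il process_causes_il_alt; rw [h]
  | some cs =>
    rw [pvA_eq rows cs h]
    unfold process_causes_il_alt
    rw [h]
    simp only []
    rw [pvScan rows cs.toList [] []]
    rw [List.nil_append, pvCondB_eq_pvCond]
    have hne := pvSp1_ne_nil cs.toList
    cases h1 : pvSp1 cs.toList with
    | nil => exact absurd h1 hne
    | cons x xs => simp [pvModp]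

-- ===== VERDICT (by name: the statement is the Claim_ definition above) =====
theorem process_causes_il_spec : Claim_equal_process_causes_il := by
  intro rows _ _
  unfold Spec_process_causes_il
  exact pv_ports_eq rows
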